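-- pv_equiv track=rewrite | github.com/kelvin-273/pyragene | eugene/utils.py | distribute_to_ranges
-- ===== SOURCE A (Python) =====
-- from typing import List, Tuple
--
-- def distribute_to_ranges(instance_array: List[int]) -> List[Tuple[int, int]]:
--     """
--     Given a distribute instance, returns an array of ranges
--     [(s_0, e_0), ..., (s_{m-1}, e_{m-1})] where m is the number of genotypes in
--     the initial population.
--     """
--     d = {}
--     for i, x in enumerate(instance_array):
--         if x in d:
--             s, _ = d[x]
--             d[x] = (s, i)
--         else:
--             d[x] = (i, i)
--     return list(d.values())
-- ===== SOURCE B (Python) =====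
-- def distribute_to_ranges(instance_array):
--     # For each distinct value (first-appearance order via dict.fromkeys),
--     # find its first index by a forward search and its last index by a
--     # search in the reversed list.  No running dict of ranges is kept.
--     n = len(instance_array)
--     rev = instance_array[::-1]
--     return [(instance_array.index(x), n - 1 - rev.index(x))
--             for x in dict.fromkeys(instance_array)]
-- ===== Notes on version B (the rewrite author's own statement) =====
-- stated objective: alternative
-- what changed: A builds the ranges incrementally in one pass with a dict of (first,last) tuples; B keeps no ranges at all: it deduplicates the values and recomputes each range by two searches, list.index on the list for the first index and on its reversal for the last. B trades A's O(n) single pass for O(n*m) searches.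
import Mathlib
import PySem

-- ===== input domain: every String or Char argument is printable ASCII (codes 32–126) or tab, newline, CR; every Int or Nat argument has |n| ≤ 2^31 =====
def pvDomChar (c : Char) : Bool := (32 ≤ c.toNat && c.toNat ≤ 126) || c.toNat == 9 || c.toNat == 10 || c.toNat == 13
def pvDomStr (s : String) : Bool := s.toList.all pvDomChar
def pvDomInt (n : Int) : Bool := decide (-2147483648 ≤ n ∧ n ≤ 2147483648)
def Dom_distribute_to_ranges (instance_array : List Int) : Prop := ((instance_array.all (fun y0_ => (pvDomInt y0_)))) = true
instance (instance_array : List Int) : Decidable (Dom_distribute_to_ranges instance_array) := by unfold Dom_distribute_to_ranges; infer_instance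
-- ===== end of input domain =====

-- B replaces A's incremental dict of (first,last) tuples by search: dedupe the
-- values, then recover each range with list.index on the list and on its
-- reversal; objective: alternative algorithm (no range state), not faster.

-- ===== PORT A =====
-- one loop, dict value = (first, last); 's, _ = d[x]' ported as the first
-- component of the (always-present, because of the contains test) entry
def distribute_to_ranges (instance_array : List Int) : List (Int × Int) :=
  let d : PySem.Dict Int (Int × Int) :=
    (PySem.List.enumerate instance_array 0).foldl
      (fun d p =>
        if d.contains p.2 then
          d.insert p.2 (((d.get? p.2).getD (0, 0)).1, p.1)
        else
          d.insert p.2 (p.1, p.1))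
      PySem.Dict.empty
  d.values

-- ===== PORT B =====
-- dict.fromkeys → PySem.List.dedup; xs[::-1] → slice?; x always occurs in the
-- list (x ranges over its dedup), so .index never raises and is ported with getD
def distribute_to_ranges_alt (instance_array : List Int) : List (Int × Int) :=
  let n : Int := instance_array.length
  let rev : List Int := (PySem.List.slice? instance_array none none (-1)).getD []
  (PySem.List.dedup instance_array).map
    (fun x => ((((PySem.List.index? instance_array x).getD 0 : Nat) : Int),
               n - 1 - (((PySem.List.index? rev x).getD 0 : Nat) : Int)))

-- ===== PRECONDITION & SPEC =====
def Spec_distribute_to_ranges (instance_array : List Int) (out : List (Int × Int)) : Prop := out = distribute_to_ranges_alt instance_array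
instance (instance_array : List Int) (out : List (Int × Int)) : Decidable (Spec_distribute_to_ranges instance_array out) := by unfold Spec_distribute_to_ranges; infer_instance

-- ===== CLAIM (what is proved, stated in full; the proofs are below) =====
def Claim_equal_distribute_to_ranges : Prop := ∀ (instance_array : List Int), Dom_distribute_to_ranges instance_array → Spec_distribute_to_ranges instance_array (distribute_to_ranges instance_array)

-- ===== LEMMAS AND PROOFS =====

-- the (first, last) pair B computes for value k in list p
def pvVal (p : List Int) (k : Int) : Int × Int :=
  ((((PySem.List.index? p k).getD 0 : Nat) : Int),
   (p.length : Int) - 1 - (((PySem.List.index? p.reverse k).getD 0 : Nat) : Int))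

theorem pv_dedup_append (p : List Int) (x : Int) :
    PySem.List.dedup (p ++ [x]) =
      if x ∈ p then PySem.List.dedup p else PySem.List.dedup p ++ [x] := by
  simp only [PySem.List.dedup_eq_ofList, PySem.Set.ofList_eq_foldl, List.foldl_append,
    List.foldl_cons, List.foldl_nil]
  rw [← PySem.Set.ofList_eq_foldl]
  by_cases hx : x ∈ p
  · simp [PySem.Set.add, hx, PySem.Set.contains, PySem.Set.mem_ofList]
  · simp [PySem.Set.add, hx, PySem.Set.contains, PySem.Set.mem_ofList]
theorem pv_val_append_of_mem (p : List Int) (x k : Int) (hk : k ∈ p) (hne : k ≠ x) :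
    pvVal (p ++ [x]) k = pvVal p k := by
  obtain ⟨r, hr⟩ := Option.isSome_iff_exists.mp
    ((PySem.List.index?_isSome_iff (xs := p.reverse) (v := k)).mpr (by simpa using hk))
  unfold pvVal
  rw [PySem.List.index?_append_of_mem _ hk]
  simp only [List.reverse_append, List.reverse_singleton, List.singleton_append]
  rw [PySem.List.index?_cons_of_ne _ (Ne.symm hne), hr]
  simp only [Option.map_some, Option.getD_some, List.length_append, List.length_singleton]
  push_cast
  ring_nf
theorem pv_val_append_self_snd (p : List Int) (x : Int) :
    (pvVal (p ++ [x]) x).2 = (p.length : Int) := by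
  unfold pvVal
  simp only [List.reverse_append, List.reverse_singleton, List.singleton_append,
    PySem.List.index?_cons_self, Option.getD_some, List.length_append, List.length_singleton]
  push_cast; ring
theorem pv_val_append_self_fst_mem (p : List Int) (x : Int) (hx : x ∈ p) :
    (pvVal (p ++ [x]) x).1 = (pvVal p x).1 := by
  unfold pvVal
  rw [PySem.List.index?_append_of_mem _ hx]
theorem pv_val_append_self_fst_notmem (p : List Int) (x : Int) (hx : x ∉ p) :
    (pvVal (p ++ [x]) x).1 = (p.length : Int) := by
  unfold pvVal
  rw [PySem.List.index?_append_singleton_self p x hx]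
  simp

theorem pv_inv (p : List Int) :
    ((PySem.List.enumerate p 0).foldl
      (fun d q =>
        if d.contains q.2 then
          d.insert q.2 (((d.get? q.2).getD (0, 0)).1, q.1)
        else
          d.insert q.2 (q.1, q.1))
      PySem.Dict.empty).items
      = (PySem.List.dedup p).map (fun k => (k, pvVal p k)) := by
  induction p using List.reverseRecOn with
  | nil => simp [PySem.List.enumerate_nil, PySem.Dict.empty, PySem.List.dedup]
  | append_singleton p x ih =>
    rw [PySem.List.enumerate_append, List.foldl_append]
    simp only [PySem.List.enumerate_cons, PySem.List.enumerate_nil, List.foldl_cons,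
      List.foldl_nil, zero_add]
    set dA := (PySem.List.enumerate p 0).foldl
      (fun d q =>
        if d.contains q.2 then
          d.insert q.2 (((d.get? q.2).getD (0, 0)).1, q.1)
        else
          d.insert q.2 (q.1, q.1))
      PySem.Dict.empty with hdA
    have hkeys : dA.keys = PySem.List.dedup p := by
      simp [PySem.Dict.keys, ih, List.map_map, Function.comp_def]
    have hnd : dA.keys.Nodup := by rw [hkeys]; exact PySem.List.nodup_dedup p
    by_cases hx : x ∈ p
    · have hc : dA.contains x = true := by
        rw [PySem.Dict.contains_eq_decide_mem_keys, hkeys]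
        simp [hx]
      have hget : dA.get? x = some (pvVal p x) :=
        PySem.Dict.get?_of_mem_items _
          (by rw [ih]; exact List.mem_map.mpr ⟨x, by simp [hx], rfl⟩) hnd
      rw [if_pos hc, hget]
      rw [PySem.Dict.items_insert_of_contains _ _ hc, ih, pv_dedup_append, if_pos hx,
        List.map_map]
      apply List.map_congr_left
      intro k hk
      by_cases hkx : k = x
      · subst hkx
        simp only [Function.comp, Option.getD_some, beq_self_eq_true, if_pos]
        refine congrArg _ (Prod.ext ?_ ?_)
        · exact (pv_val_append_self_fst_mem p k hx).symm
        · exact (pv_val_append_self_snd p k).symm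
      · have hkp : k ∈ p := (PySem.List.mem_dedup p k).mp hk
        simp [Function.comp, hkx, pv_val_append_of_mem p x k hkp hkx]
    · have hc : dA.contains x = false := by
        rw [PySem.Dict.contains_eq_decide_mem_keys, hkeys]
        simp [hx]
      rw [if_neg (by simp [hc]), PySem.Dict.items_insert_of_not_contains _ _ hc, ih,
        pv_dedup_append, if_neg hx, List.map_append]
      congr 1
      · apply List.map_congr_left
        intro k hk
        have hkp : k ∈ p := (PySem.List.mem_dedup p k).mp hk
        have hkx : k ≠ x := fun h => hx (h ▸ hkp)
        rw [pv_val_append_of_mem p x k hkp hkx]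
      · simp only [List.map_cons, List.map_nil]
        refine congrArg (· :: []) (Prod.ext rfl (Prod.ext ?_ ?_))
        · exact (pv_val_append_self_fst_notmem p x hx).symm
        · exact (pv_val_append_self_snd p x).symm

-- ===== VERDICT (by name: the statement is the Claim_ definition above) =====
theorem distribute_to_ranges_spec : Claim_equal_distribute_to_ranges := by
  intro l _
  show distribute_to_ranges l = distribute_to_ranges_alt l
  simp only [distribute_to_ranges, distribute_to_ranges_alt, PySem.Dict.values,
    PySem.List.slice?_none_none_neg_one, Option.getD_some, pv_inv, List.map_map]
  apply List.map_congr_left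
  intro k _
  simp [Function.comp, pvVal]
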